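-- pv_equiv track=rewrite | github.com/rubakas/agent-notes | agent_notes/data/templates/frontmatter/opencode.py | _strip_memory_section
-- ===== SOURCE A (Python) =====
-- def _strip_memory_section(content: str) -> str:
--     """Strip ## Memory section from content for OpenCode format."""
--     lines = content.split('\n')
--     result_lines = []
--     in_memory_section = False
--
--     for line in lines:
--         if line.startswith('## Memory'):
--             in_memory_section = True
--             continue
--         elif line.startswith('## ') and in_memory_section:
--             # New section after Memory, include this line and continue
--             in_memory_section = False
--             result_lines.append(line)
--         elif not in_memory_section:
--             result_lines.append(line)
--
--     # Remove trailing empty lines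
--     while result_lines and result_lines[-1].strip() == '':
--         result_lines.pop()
--
--     return '\n'.join(result_lines)
-- ===== SOURCE B (Python) =====
-- def _strip_memory_section(content: str) -> str:
--     """Strip ## Memory section from content for OpenCode format."""
--     lines = content.split('\n')
--     # group lines into sections: a new section starts at every '## ' header
--     sections = []
--     cur = []
--     for line in lines:
--         if line.startswith('## '):
--             sections.append(cur)
--             cur = [line]
--         else:
--             cur.append(line)
--     sections.append(cur)
--     # drop every section headed by a '## Memory' line, keep the rest in order
--     kept = [sec for sec in sections if not (sec and sec[0].startswith('## Memory'))]
--     out = [line for sec in kept for line in sec]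
--     # Remove trailing empty lines
--     while out and out[-1].strip() == '':
--         out.pop()
--     return '\n'.join(out)
-- ===== Notes on version B (the rewrite author's own statement) =====
-- stated objective: alternative
-- what changed: Replaces A's single pass with an in-loop 'in memory section' boolean flag by a two-stage pass: group the lines into sections starting at each '## ' header, filter out sections headed by '## Memory', and flatten the survivors before the shared trailing-blank-line trim and join.
import Mathlib
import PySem

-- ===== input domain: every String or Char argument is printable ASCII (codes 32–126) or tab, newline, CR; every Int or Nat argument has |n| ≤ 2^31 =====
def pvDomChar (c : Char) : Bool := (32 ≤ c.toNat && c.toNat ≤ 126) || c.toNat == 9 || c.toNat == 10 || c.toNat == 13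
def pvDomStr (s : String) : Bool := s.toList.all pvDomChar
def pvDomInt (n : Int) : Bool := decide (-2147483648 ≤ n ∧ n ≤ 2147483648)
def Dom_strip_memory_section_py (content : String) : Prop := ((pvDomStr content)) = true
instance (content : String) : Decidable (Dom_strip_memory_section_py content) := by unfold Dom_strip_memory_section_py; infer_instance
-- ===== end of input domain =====

-- B replaces A's in-loop membership flag by a two-stage pass (group lines into '## '-headed
-- sections, then filter out the '## Memory'-headed sections); objective 'alternative', same cost.
-- Lines are handled as List Char via PySem.Chars (exact on the ASCII domain).

-- shared helper: both Pythons end with the identical while/pop loop removing trailing blank lines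
def pyPopTrailing (xs : List (List Char)) : List (List Char) :=
  match h : xs.getLast? with
  | none => xs
  | some l => if PySem.Chars.strip l = [] then pyPopTrailing xs.dropLast else xs
termination_by xs.length
decreasing_by
  cases xs with
  | nil => simp at h
  | cons a as => simp [List.length_dropLast]

-- ===== PORT A =====
def aLoop : List (List Char) → List (List Char) → Bool → List (List Char)
  | [], acc, _ => acc
  | line :: rest, acc, inMem =>
    if PySem.Chars.startswith line "## Memory".toList then aLoop rest acc true
    else if PySem.Chars.startswith line "## ".toList && inMem then aLoop rest (acc ++ [line]) false
    else if !inMem then aLoop rest (acc ++ [line]) inMem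
    else aLoop rest acc inMem

def strip_memory_section_py (content : String) : String :=
  String.mk (PySem.Chars.join "\n".toList
    (pyPopTrailing (aLoop (PySem.Chars.splitOn content.toList "\n".toList) [] false)))

-- ===== PORT B =====
def bKeep : List (List Char) → Bool
  | [] => true
  | h :: _ => ! PySem.Chars.startswith h "## Memory".toList

def bStep (st : List (List (List Char)) × List (List Char)) (line : List Char) :
    List (List (List Char)) × List (List Char) :=
  if PySem.Chars.startswith line "## ".toList then (st.1 ++ [st.2], [line])
  else (st.1, st.2 ++ [line])

def strip_memory_section_py_alt (content : String) : String :=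
  let st := (PySem.Chars.splitOn content.toList "\n".toList).foldl bStep ([], [])
  let sections := st.1 ++ [st.2]
  let out := (sections.filter bKeep).flatten
  String.mk (PySem.Chars.join "\n".toList (pyPopTrailing out))

-- ===== PRECONDITION & SPEC =====
def Spec_strip_memory_section_py (content : String) (out : String) : Prop := out = strip_memory_section_py_alt content
instance (content : String) (out : String) : Decidable (Spec_strip_memory_section_py content out) := by unfold Spec_strip_memory_section_py; infer_instance

-- ===== CLAIM (what is proved, stated in full; the proofs are below) =====
def Claim_equal_strip_memory_section_py : Prop := ∀ (content : String), Dom_strip_memory_section_py content → Spec_strip_memory_section_py content (strip_memory_section_py content)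

-- ===== LEMMAS AND PROOFS =====

-- the common "skip Memory sections" line transformer both ports compute
def fSkip : List (List Char) → Bool → List (List Char)
  | [], _ => []
  | line :: rest, inMem =>
    if PySem.Chars.startswith line "## Memory".toList then fSkip rest true
    else if PySem.Chars.startswith line "## ".toList && inMem then line :: fSkip rest false
    else if !inMem then line :: fSkip rest inMem
    else fSkip rest inMem

theorem sw_memory_imp_hash (l : List Char) :
    PySem.Chars.startswith l ['#', '#', ' ', 'M', 'e', 'm', 'o', 'r', 'y'] = true →
    PySem.Chars.startswith l ['#', '#', ' '] = true := by
  simp only [PySem.Chars.startswith_iff]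
  intro h
  exact List.IsPrefix.trans (by decide) h

theorem sw_hash_false_memory (l : List Char)
    (h : PySem.Chars.startswith l ['#', '#', ' '] = false) :
    PySem.Chars.startswith l ['#', '#', ' ', 'M', 'e', 'm', 'o', 'r', 'y'] = false := by
  cases hm : PySem.Chars.startswith l ['#', '#', ' ', 'M', 'e', 'm', 'o', 'r', 'y'] with
  | false => rfl
  | true => rw [sw_memory_imp_hash l hm] at h; exact h

theorem bKeep_append (cur : List (List Char)) (l : List Char)
    (h : PySem.Chars.startswith l ['#', '#', ' '] = false) : bKeep (cur ++ [l]) = bKeep cur := by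
  cases cur with
  | nil => simp [bKeep, sw_hash_false_memory l h]
  | cons a as => simp [bKeep]

theorem aLoop_acc (lines : List (List Char)) : ∀ (acc : List (List Char)) (inMem : Bool),
    aLoop lines acc inMem = acc ++ fSkip lines inMem := by
  induction lines with
  | nil => intro acc inMem; simp [aLoop, fSkip]
  | cons line rest ih =>
      intro acc inMem
      simp only [aLoop, fSkip]
      split_ifs with h1 h2 h3 <;> simp [ih]

theorem bFold (lines : List (List Char)) :
    ∀ (sections : List (List (List Char))) (cur : List (List Char)),
    (((lines.foldl bStep (sections, cur)).1 ++ [(lines.foldl bStep (sections, cur)).2]).filter bKeep).flatten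
      = ((sections.filter bKeep).flatten ++ (if bKeep cur then cur else [])) ++ fSkip lines (!bKeep cur) := by
  induction lines with
  | nil =>
      intro sections cur
      simp only [List.foldl_nil, fSkip, List.filter_append, List.flatten_append]
      cases h : bKeep cur <;> simp [List.filter, h]
  | cons line rest ih =>
      intro sections cur
      have e1 : "## ".toList = ['#', '#', ' '] := rfl
      have e2 : "## Memory".toList = ['#', '#', ' ', 'M', 'e', 'm', 'o', 'r', 'y'] := rfl
      simp only [List.foldl_cons, bStep, e1, e2]
      by_cases hh : PySem.Chars.startswith line ['#', '#', ' '] = true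
      · simp only [hh, if_pos]
        rw [ih]
        by_cases hm : PySem.Chars.startswith line ['#', '#', ' ', 'M', 'e', 'm', 'o', 'r', 'y'] = true
        · have hk : bKeep [line] = false := by simp [bKeep, hm]
          have hf : fSkip (line :: rest) (!bKeep cur) = fSkip rest true := by
            simp [fSkip, hm]
          rw [hf]
          simp only [hk, Bool.false_eq_true, ite_false, Bool.not_false,
            List.filter_append, List.flatten_append]
          cases hc : bKeep cur <;> simp [List.filter, hc]
        · have hm' : PySem.Chars.startswith line ['#', '#', ' ', 'M', 'e', 'm', 'o', 'r', 'y'] = false := by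
            cases h : PySem.Chars.startswith line ['#', '#', ' ', 'M', 'e', 'm', 'o', 'r', 'y'] with
            | false => rfl
            | true => exact absurd h hm
          have hk : bKeep [line] = true := by simp [bKeep, hm']
          have hf : fSkip (line :: rest) (!bKeep cur) = line :: fSkip rest false := by
            cases hc : bKeep cur <;> simp [fSkip, hm', hh]
          rw [hf]
          simp only [hk, ite_true, Bool.not_true, List.filter_append, List.flatten_append]
          cases hc : bKeep cur <;> simp [List.filter, hc]
      · have hh' : PySem.Chars.startswith line ['#', '#', ' '] = false := by
          cases h : PySem.Chars.startswith line ['#', '#', ' '] with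
          | false => rfl
          | true => exact absurd h hh
        have hm' := sw_hash_false_memory line hh'
        simp only [hh', Bool.false_eq_true, ite_false]
        rw [ih, bKeep_append cur line hh']
        have hf : fSkip (line :: rest) (!bKeep cur)
            = (if bKeep cur then [line] else []) ++ fSkip rest (!bKeep cur) := by
          cases hc : bKeep cur <;> simp [fSkip, hm', hh']
        rw [hf]
        cases hc : bKeep cur <;> simp

-- ===== VERDICT (by name: the statement is the Claim_ definition above) =====
theorem strip_memory_section_py_spec : Claim_equal_strip_memory_section_py := by
  intro content _
  unfold Spec_strip_memory_section_py strip_memory_section_py strip_memory_section_py_alt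
  rw [aLoop_acc]
  dsimp only
  rw [bFold]
  simp [bKeep, List.filter]
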